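-- pv_equiv track=rewrite | github.com/germarr/fifaworldcup2026 | app/tournament_config.py | generate_knockout_bracket_structure
-- ===== SOURCE A (Python) =====
-- from typing import List, Tuple
--
-- def generate_knockout_bracket_structure(num_qualifying_teams: int) -> List[Tuple[str, str, int, str]]:
--     """
--     Generate knockout bracket structure based on number of qualifying teams.
--
--     Args:
--         num_qualifying_teams: Total teams entering knockout stage (e.g., 16, 24, 32, 48)
--
--     Returns:
--         List of rounds with their structure:
--         [(round_name, num_matches, starting_match_number, description), ...]
--
--     Examples:
--         16 teams -> Round of 16 (8), Quarters (4), Semis (2), Third Place (1), Final (1)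
--         32 teams -> Round of 32 (16), Round of 16 (8), Quarters (4), Semis (2), Third Place (1), Final (1)
--
--     Match numbering for 12 groups (32 teams in knockout):
--         73-88: Round of 32 (16 matches)
--         89-96: Round of 16 (8 matches)
--         97-100: Quarter Finals (4 matches)
--         101-102: Semi Finals (2 matches)
--         103: Third Place (1 match)
--         104: Final (1 match)
--     """
--     rounds = []
--     current_teams = num_qualifying_teams
--     match_num = 73  # Assuming 72 group stage matches
--
--     # Handle each power of 2 from current_teams down to 4
--     while current_teams >= 4:
--         num_matches = current_teams // 2
--
--         if current_teams == 32:
--             round_name = "Round of 32"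
--         elif current_teams == 16:
--             round_name = "Round of 16"
--         elif current_teams == 8:
--             round_name = "Quarter Finals"
--         elif current_teams == 4:
--             round_name = "Semi Finals"
--         else:
--             # For non-standard sizes (e.g., 64, 128)
--             round_name = f"Round of {current_teams}"
--
--         rounds.append((round_name, num_matches, match_num, f"{num_matches} matches"))
--         match_num += num_matches
--         current_teams //= 2
--
--     # Third place and Final
--     rounds.append(("Third Place", 1, match_num, "Losers of semis"))
--     match_num += 1
--     rounds.append(("Final", 1, match_num, "Winners of semis"))
--
--     return rounds
-- ===== SOURCE B (Python) =====
-- def generate_knockout_bracket_structure(num_qualifying_teams):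
--     # Closed-form numbering: round j has size n >> j; the matches played before it
--     # (sum_{k=1..j} n >> k) telescope to n - (n >> j) - (n % 2**j).bit_count(),
--     # so every round's tuple is computed independently of the others.
--     n = num_qualifying_teams
--     NAMES = {32: "Round of 32", 16: "Round of 16", 8: "Quarter Finals", 4: "Semi Finals"}
--
--     def start(j):
--         return 73 + n - (n >> j) - (n % 2 ** j).bit_count()
--
--     r = n.bit_length() - 2 if n >= 4 else 0
--     rounds = [(NAMES.get(n >> j, f"Round of {n >> j}"), n >> (j + 1), start(j),
--                f"{n >> (j + 1)} matches") for j in range(r)]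
--     return rounds + [("Third Place", 1, start(r), "Losers of semis"),
--                      ("Final", 1, start(r) + 1, "Winners of semis")]
-- ===== Notes on version B (the rewrite author's own statement) =====
-- stated objective: alternative
-- what changed: Replaces A's halving loop that threads a running match-number accumulator with a closed-form bit-arithmetic formula: the number of rounds is n.bit_length()-2 and each round j is computed independently with size n>>j and starting match 73 + n - (n>>j) - (n % 2**j).bit_count(), since the preceding match counts telescope to that expression.
import Mathlib
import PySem

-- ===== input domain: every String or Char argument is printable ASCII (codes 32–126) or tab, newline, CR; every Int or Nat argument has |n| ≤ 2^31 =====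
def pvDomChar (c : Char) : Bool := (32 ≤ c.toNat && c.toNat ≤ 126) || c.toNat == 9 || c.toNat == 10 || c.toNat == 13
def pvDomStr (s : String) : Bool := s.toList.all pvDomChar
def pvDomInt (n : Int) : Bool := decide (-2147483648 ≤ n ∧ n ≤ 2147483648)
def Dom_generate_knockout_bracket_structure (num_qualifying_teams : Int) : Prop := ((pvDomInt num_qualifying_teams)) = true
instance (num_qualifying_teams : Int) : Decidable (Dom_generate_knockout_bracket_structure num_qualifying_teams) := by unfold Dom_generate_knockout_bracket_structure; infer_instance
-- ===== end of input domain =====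

-- B replaces A's halving loop with its threaded match-number accumulator by a closed-form
-- bit-arithmetic computation: each round is computed independently (objective: alternative, same cost).

-- ===== PORT A =====
-- the while-loop of A: state (current_teams, match_num), returns (rounds, final match_num).
-- Structural recursion on a fuel bound (a totality guard only: current_teams shrinks by at
-- least half each iteration, so fuel = num_qualifying_teams.toNat is never exhausted while
-- current_teams >= 4; a negative or small input never enters the loop, matching Python).
def pvLoopA : Nat → Int → Int → List (String × Int × Int × String) × Int
  | 0, _, mn => ([], mn)
  | fuel + 1, ct, mn =>
    if ct ≥ 4 then
      let nm := PySem.Int.floordiv ct 2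
      let round_name : String :=
        if ct = 32 then "Round of 32"
        else if ct = 16 then "Round of 16"
        else if ct = 8 then "Quarter Finals"
        else if ct = 4 then "Semi Finals"
        else "Round of " ++ PySem.Int.toStr ct
      let rest := pvLoopA fuel (PySem.Int.floordiv ct 2) (mn + nm)
      ((round_name, nm, mn, PySem.Int.toStr nm ++ " matches") :: rest.1, rest.2)
    else ([], mn)

def generate_knockout_bracket_structure (num_qualifying_teams : Int) : List (String × Int × Int × String) :=
  let r := pvLoopA num_qualifying_teams.toNat num_qualifying_teams 73
  r.1 ++ [("Third Place", 1, r.2, "Losers of semis"), ("Final", 1, r.2 + 1, "Winners of semis")]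

-- ===== PORT B =====
-- Python's n >> j is Lean's n >>> j; n.bit_length() is PySem.Int.bitLength; (…).bit_count() is
-- PySem.Int.bitCount; n % 2**j is PySem.Int.mod (all Python-exact).  Python's
-- `n.bit_length() - 2` is ≥ 1 whenever the branch `n >= 4` is taken, so Nat subtraction is exact.
def pvStartB (n : Int) (j : Nat) : Int :=
  73 + n - (n >>> j) - (PySem.Int.bitCount (PySem.Int.mod n ((2:Int) ^ j)) : Int)

def generate_knockout_bracket_structure_alt (num_qualifying_teams : Int) : List (String × Int × Int × String) :=
  let n := num_qualifying_teams
  let names : PySem.Dict Int String :=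
    PySem.Dict.ofList [(32, "Round of 32"), (16, "Round of 16"), (8, "Quarter Finals"), (4, "Semi Finals")]
  let r : Nat := if n ≥ 4 then PySem.Int.bitLength n - 2 else 0
  let rounds := (List.range r).map (fun (j : Nat) =>
    ((names.get? (n >>> j)).getD ("Round of " ++ PySem.Int.toStr (n >>> j)),
     n >>> (j + 1), pvStartB n j,
     PySem.Int.toStr (n >>> (j + 1)) ++ " matches"))
  rounds ++ [("Third Place", 1, pvStartB n r, "Losers of semis"),
             ("Final", 1, pvStartB n r + 1, "Winners of semis")]

-- ===== PRECONDITION & SPEC =====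
def Spec_generate_knockout_bracket_structure (num_qualifying_teams : Int) (out : List (String × Int × Int × String)) : Prop := out = generate_knockout_bracket_structure_alt num_qualifying_teams
instance (num_qualifying_teams : Int) (out : List (String × Int × Int × String)) : Decidable (Spec_generate_knockout_bracket_structure num_qualifying_teams out) := by unfold Spec_generate_knockout_bracket_structure; infer_instance

-- ===== CLAIM (what is proved, stated in full; the proofs are below) =====
def Claim_equal_generate_knockout_bracket_structure : Prop := ∀ (num_qualifying_teams : Int), Dom_generate_knockout_bracket_structure num_qualifying_teams → Spec_generate_knockout_bracket_structure num_qualifying_teams (generate_knockout_bracket_structure num_qualifying_teams)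

-- ===== LEMMAS AND PROOFS =====

-- the per-round tuple A's loop emits, parameterised by size and starting match number
def pvRow (s b : Int) : String × Int × Int × String :=
  ((if s = 32 then "Round of 32"
    else if s = 16 then "Round of 16"
    else if s = 8 then "Quarter Finals"
    else if s = 4 then "Semi Finals"
    else "Round of " ++ PySem.Int.toStr s),
   PySem.Int.floordiv s 2, b, PySem.Int.toStr (PySem.Int.floordiv s 2) ++ " matches")

-- B's closed-form start, on the Nat side
def pvStN (m j : Nat) : Int :=
  73 + (m : Int) - ((m / 2 ^ j : Nat) : Int) - (PySem.Int.bitCount ((m % 2 ^ j : Nat) : Int) : Int)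

-- bit j sits above the low j bits: stacking it adds exactly b to the popcount
theorem pvBitCount_add (j : Nat) : ∀ a b : Nat, a < 2 ^ j → b < 2 →
    PySem.Int.bitCount ((2 ^ j * b + a : Nat) : Int) = b + PySem.Int.bitCount ((a : Nat) : Int) := by
  induction j with
  | zero =>
    intro a b ha hb
    interval_cases a
    interval_cases b
    · simp
    · decide
  | succ j ih =>
    intro a b ha hb
    rcases Nat.eq_zero_or_pos (2 ^ (j + 1) * b + a) with h0 | hpos
    · have hb0 : 2 ^ (j + 1) * b = 0 := by omega
      have hb0' : b = 0 := by
        rcases Nat.mul_eq_zero.mp hb0 with h | h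
        · exact absurd h (Nat.pow_pos (a := 2) (n := j + 1) (by norm_num)).ne'
        · exact h
      have ha0 : a = 0 := by omega
      simp [hb0', ha0]
    · rw [PySem.Int.bitCount_natCast hpos]
      have hkey : 2 ^ (j + 1) * b = 2 * (2 ^ j * b) := by ring
      have hdiv : (2 ^ (j + 1) * b + a) / 2 = 2 ^ j * b + a / 2 := by omega
      have hmod : (2 ^ (j + 1) * b + a) % 2 = a % 2 := by omega
      rw [hdiv, hmod, ih (a / 2) b (by omega) hb]
      rcases Nat.eq_zero_or_pos a with haz | hap
      · simp [haz]
      · rw [PySem.Int.bitCount_natCast hap]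
        omega

-- the telescoping step: B's closed-form start increases by exactly the next round's match count
theorem pvStN_step (m j : Nat) : pvStN m (j + 1) = pvStN m j + ((m / 2 ^ (j + 1) : Nat) : Int) := by
  have hmod : m % 2 ^ (j + 1) = 2 ^ j * (m / 2 ^ j % 2) + m % 2 ^ j := by
    rw [Nat.mod_pow_succ]; ring
  have hbc : PySem.Int.bitCount ((m % 2 ^ (j + 1) : Nat) : Int)
      = m / 2 ^ j % 2 + PySem.Int.bitCount ((m % 2 ^ j : Nat) : Int) := by
    rw [hmod]
    exact pvBitCount_add j _ _ (Nat.mod_lt _ (Nat.pow_pos (by norm_num))) (Nat.mod_lt _ (by norm_num))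
  have hsplit : m / 2 ^ j = 2 * (m / 2 ^ (j + 1)) + m / 2 ^ j % 2 := by
    rw [pow_succ, ← Nat.div_div_eq_div_mul]
    omega
  unfold pvStN
  rw [hbc, Nat.cast_add]
  omega

-- bit_length is at least 3 once m ≥ 4
theorem pvSize_lb (m : Nat) (hm : 4 ≤ m) : 3 ≤ PySem.Int.bitLength (m : Int) := by
  by_contra h
  have hlt := PySem.Int.lt_two_pow_bitLength (m : Int)
  have : (m : Int).natAbs = m := Int.natAbs_natCast m
  have hble : PySem.Int.bitLength (m : Int) ≤ 2 := by omega
  have : (2:Nat) ^ PySem.Int.bitLength (m : Int) ≤ 2 ^ 2 := Nat.pow_le_pow_right (by norm_num) hble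
  omega

-- r = bit_length − 2 characterises A's loop bound: round j exists iff size m / 2^j is still ≥ 4
theorem pvLt_r_iff (m j : Nat) (hm : 4 ≤ m) :
    j < PySem.Int.bitLength (m : Int) - 2 ↔ 4 ≤ m / 2 ^ j := by
  have hbl := pvSize_lb m hm
  have habs : (m : Int).natAbs = m := Int.natAbs_natCast m
  have hdiv : 4 ≤ m / 2 ^ j ↔ 4 * 2 ^ j ≤ m :=
    Nat.le_div_iff_mul_le (Nat.pow_pos (by norm_num))
  constructor
  · intro hj
    have h1 : j + 2 ≤ PySem.Int.bitLength (m : Int) - 1 := by omega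
    have h2 : (2:Nat) ^ (j + 2) ≤ 2 ^ (PySem.Int.bitLength (m : Int) - 1) :=
      Nat.pow_le_pow_right (by norm_num) h1
    have h3 := PySem.Int.two_pow_bitLength_le (m : Int) (by exact_mod_cast (by omega : m ≠ 0))
    rw [habs] at h3
    have : (2:Nat) ^ (j + 2) = 4 * 2 ^ j := by ring
    omega
  · intro hj
    have h1 : (2:Nat) ^ (j + 2) ≤ m := by
      have : (2:Nat) ^ (j + 2) = 4 * 2 ^ j := by ring
      omega
    have h2 := PySem.Int.lt_two_pow_bitLength (m : Int)
    rw [habs] at h2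
    have h3 : (2:Nat) ^ (j + 2) < 2 ^ PySem.Int.bitLength (m : Int) := by omega
    have h4 : j + 2 < PySem.Int.bitLength (m : Int) :=
      (Nat.pow_lt_pow_iff_right (by norm_num)).mp h3
    omega

-- A's loop, run from round j at size m / 2^j and start pvStN m j, emits exactly the closed-form rows
theorem pvLoopA_closed (fuel : Nat) : ∀ m j : Nat, 4 ≤ m →
    j ≤ PySem.Int.bitLength (m : Int) - 2 → m / 2 ^ j ≤ fuel →
    pvLoopA fuel ((m / 2 ^ j : Nat) : Int) (pvStN m j)
      = ((List.range' j (PySem.Int.bitLength (m : Int) - 2 - j)).map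
           (fun i => pvRow ((m / 2 ^ i : Nat) : Int) (pvStN m i)),
         pvStN m (PySem.Int.bitLength (m : Int) - 2)) := by
  induction fuel with
  | zero =>
    intro m j hm hj hfuel
    exfalso
    rcases Nat.lt_or_ge j (PySem.Int.bitLength (m : Int) - 2) with hlt | hge
    · have := (pvLt_r_iff m j hm).mp hlt; omega
    · have hjr : j = PySem.Int.bitLength (m : Int) - 2 := by omega
      -- m / 2^r ≥ 2 since 2^(bl-1) ≤ m
      have hbl := pvSize_lb m hm
      have h3 := PySem.Int.two_pow_bitLength_le (m : Int) (by exact_mod_cast (by omega : m ≠ 0))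
      rw [Int.natAbs_natCast] at h3
      have h5 : (2:Nat) ^ (PySem.Int.bitLength (m : Int) - 1)
          = 2 ^ (PySem.Int.bitLength (m : Int) - 2) * 2 := by
        rw [← pow_succ]
        congr 1
        omega
      have h6 : 2 ≤ m / 2 ^ (PySem.Int.bitLength (m : Int) - 2) := by
        rw [Nat.le_div_iff_mul_le (Nat.pow_pos (by norm_num))]
        omega
      rw [hjr] at hfuel
      omega
  | succ fuel ih =>
    intro m j hm hj hfuel
    rcases Nat.lt_or_ge j (PySem.Int.bitLength (m : Int) - 2) with hlt | hge
    · -- loop iterates: current size ≥ 4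
      have h4 : 4 ≤ m / 2 ^ j := (pvLt_r_iff m j hm).mp hlt
      have hct : ((m / 2 ^ j : Nat) : Int) ≥ 4 := by exact_mod_cast h4
      have hnext : m / 2 ^ j / 2 = m / 2 ^ (j + 1) := by
        rw [Nat.div_div_eq_div_mul, ← pow_succ]
      have hfd : PySem.Int.floordiv ((m / 2 ^ j : Nat) : Int) 2 = ((m / 2 ^ (j + 1) : Nat) : Int) := by
        rw [show ((2:Int)) = ((2:Nat):Int) from rfl, PySem.Int.floordiv_natCast, hnext]
      have hrec := ih m (j + 1) hm (by omega)
        (by rw [← hnext]; omega)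
      rw [pvStN_step m j] at hrec
      simp only [pvLoopA, ge_iff_le, hct, if_pos, hfd, hrec]
      have hlen : PySem.Int.bitLength (m : Int) - 2 - j
          = (PySem.Int.bitLength (m : Int) - 2 - (j + 1)) + 1 := by omega
      rw [hlen, List.range'_succ]
      simp only [List.map_cons, pvRow, hfd]
    · -- loop exits: j = r and the size has dropped below 4
      have hjr : j = PySem.Int.bitLength (m : Int) - 2 := by omega
      have h4 : ¬ 4 ≤ m / 2 ^ j := by
        rw [hjr]
        intro hc
        have := (pvLt_r_iff m (PySem.Int.bitLength (m : Int) - 2) hm).mpr hc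
        omega
      have hct : ¬ ((m / 2 ^ j : Nat) : Int) ≥ 4 := by exact_mod_cast h4
      simp only [pvLoopA, hct, if_neg, not_false_iff]
      rw [hjr]
      simp

-- B's dict lookup with default equals A's if-chain
theorem pvName_eq (s : Int) :
    ((PySem.Dict.ofList [((32:Int), "Round of 32"), (16, "Round of 16"), (8, "Quarter Finals"), (4, "Semi Finals")]).get? s).getD ("Round of " ++ PySem.Int.toStr s)
    = (if s = 32 then "Round of 32"
       else if s = 16 then "Round of 16"
       else if s = 8 then "Quarter Finals"
       else if s = 4 then "Semi Finals"
       else "Round of " ++ PySem.Int.toStr s) := by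
  have h : (PySem.Dict.ofList [((32:Int), "Round of 32"), (16, "Round of 16"), (8, "Quarter Finals"), (4, "Semi Finals")])
      = PySem.Dict.mk [((32:Int), "Round of 32"), (16, "Round of 16"), (8, "Quarter Finals"), (4, "Semi Finals")] := by decide
  rw [h]
  by_cases h32 : s = 32 <;> by_cases h16 : s = 16 <;> by_cases h8 : s = 8 <;>
    by_cases h4 : s = 4 <;>
    simp [PySem.Dict.get?, h32, h16, h8, h4, beq_iff_eq, Ne.symm]

-- Python's n >> j on a nonnegative int is division by 2^j
theorem pvShift_natCast (m j : Nat) : ((m : Int) >>> j) = ((m / 2 ^ j : Nat) : Int) := by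
  rw [Int.shiftRight_eq_div_pow]
  push_cast
  rfl

-- B's closed-form start on a nonnegative input equals its Nat-side version
theorem pvStartB_natCast (m j : Nat) : pvStartB (m : Int) j = pvStN m j := by
  unfold pvStartB pvStN
  rw [pvShift_natCast, show ((2:Int) ^ j) = (((2 ^ j : Nat) : Int)) from by push_cast; rfl,
    PySem.Int.mod_natCast]

-- n >> 0 = n and n % 1 = 0, so B's start of the first round is 73 for every n
theorem pvStartB_zero (n : Int) : pvStartB n 0 = 73 := by
  unfold pvStartB
  rw [Int.shiftRight_eq_div_pow]
  norm_num

-- ===== VERDICT (by name: the statement is the Claim_ definition above) =====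
theorem generate_knockout_bracket_structure_spec : Claim_equal_generate_knockout_bracket_structure := by
  intro n _
  unfold Spec_generate_knockout_bracket_structure
  unfold generate_knockout_bracket_structure generate_knockout_bracket_structure_alt
  by_cases h4 : n ≥ 4
  · -- n ≥ 4: both sides produce the r = bit_length − 2 main rounds and the same tail
    lift n to Nat using (by omega : 0 ≤ n) with m
    have hm : 4 ≤ m := by exact_mod_cast h4
    have hbl := pvSize_lb m hm
    have hst0 : pvStN m 0 = 73 := by
      unfold pvStN
      simp [PySem.Int.bitCount_zero]
    have hA := pvLoopA_closed m m 0 hm (by omega) (by simp)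
    simp only [pow_zero, Nat.div_one] at hA
    rw [hst0] at hA
    simp only [Int.toNat_natCast, hA, if_pos h4]
    rw [List.range_eq_range']
    congr 1
    · apply List.map_congr_left
      intro j _
      rw [pvShift_natCast, pvShift_natCast, pvStartB_natCast, pvName_eq, pvRow]
      have : PySem.Int.floordiv ((m / 2 ^ j : Nat) : Int) 2 = ((m / 2 ^ (j + 1) : Nat) : Int) := by
        rw [show ((2:Int)) = ((2:Nat):Int) from rfl, PySem.Int.floordiv_natCast,
          Nat.div_div_eq_div_mul, ← pow_succ]
      rw [this]
    · rw [pvStartB_natCast]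
  · -- n < 4 (including negative): the loop never runs; both return the two tail rounds from 73
    have hA : pvLoopA n.toNat n 73 = ([], 73) := by
      cases hnt : n.toNat with
      | zero => rfl
      | succ k => simp [pvLoopA, ge_iff_le, h4]
    simp only [hA, if_neg h4, List.range_zero, List.map_nil, List.nil_append, pvStartB_zero]
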